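-- pv_equiv track=rewrite | github.com/vidarlab/multi-view-hybrid | datasets/hotels8k.py | generate_target2indices
-- ===== SOURCE A (Python) =====
-- def generate_target2indices(targets):
--     target2indices = {}
--     for i in range(len(targets)):
--         t = targets[i]
--         if t not in target2indices:
--             target2indices[t] = [i]
--         else:
--             target2indices[t].append(i)
--     return target2indices
-- ===== SOURCE B (Python) =====
-- def generate_target2indices(targets):
--     # Two-pass decomposition: distinct targets in first-occurrence order,
--     # then one comprehension collecting the indices of each.
--     keys = list(dict.fromkeys(targets))
--     return {t: [i for i, x in enumerate(targets) if x == t] for t in keys}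
-- ===== Notes on version B (the rewrite author's own statement) =====
-- stated objective: alternative
-- what changed: Replaces the single incremental dict-building pass (insert-or-append per index) with a two-pass scheme: dedup the targets first, then build each group's index list with one comprehension over enumerate.
import Mathlib
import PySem

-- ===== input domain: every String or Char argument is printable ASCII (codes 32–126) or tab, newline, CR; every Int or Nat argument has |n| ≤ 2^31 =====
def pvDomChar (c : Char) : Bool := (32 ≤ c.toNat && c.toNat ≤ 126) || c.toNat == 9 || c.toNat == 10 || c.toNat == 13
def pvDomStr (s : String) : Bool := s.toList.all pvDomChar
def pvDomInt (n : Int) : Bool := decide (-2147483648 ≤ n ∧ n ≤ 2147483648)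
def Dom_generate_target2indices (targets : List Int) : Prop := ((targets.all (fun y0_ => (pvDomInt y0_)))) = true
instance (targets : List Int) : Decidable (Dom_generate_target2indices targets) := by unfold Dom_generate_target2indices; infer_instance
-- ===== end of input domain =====

-- B replaces A's single insert-or-append dict pass by dedup-then-collect (one filter pass per distinct target); alternative decomposition, same results.


-- ===== PORT A =====
-- for i in range(len(targets)): t = targets[i]; if t not in d: d[t] = [i] else: d[t].append(i)
def generate_target2indices (targets : List Int) : List (Int × List Int) :=
  ((PySem.List.pyRange 0 (targets.length : Int) 1).foldl
    (fun (d : PySem.Dict Int (List Int)) (i : Int) =>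
      let t := PySem.List.pyGetD targets i 0      -- targets[i]; i always in range here
      if d.contains t = false then d.insert t [i]
      else d.modify t [] (fun l => l ++ [i]))     -- d[t].append(i)
    PySem.Dict.empty).items

-- ===== PORT B =====
def generate_target2indices_alt (targets : List Int) : List (Int × List Int) :=
  (PySem.List.dedup targets).map (fun t =>
    (t, ((PySem.List.enumerate targets).filter (fun p => p.2 == t)).map (fun p => p.1)))

-- ===== PRECONDITION & SPEC =====
def Spec_generate_target2indices (targets : List Int) (out : List (Int × List Int)) : Prop := out = generate_target2indices_alt targets
instance (targets : List Int) (out : List (Int × List Int)) : Decidable (Spec_generate_target2indices targets out) := by unfold Spec_generate_target2indices; infer_instance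

-- ===== CLAIM (what is proved, stated in full; the proofs are below) =====
def Claim_equal_generate_target2indices : Prop := ∀ (targets : List Int), Dom_generate_target2indices targets → Spec_generate_target2indices targets (generate_target2indices targets)

-- ===== LEMMAS AND PROOFS =====

-- A's insert-or-append branch is exactly Dict.modify with default []
theorem pv_step_eq (d : PySem.Dict Int (List Int)) (t i : Int) :
    (if d.contains t = false then d.insert t [i] else d.modify t [] (fun l => l ++ [i]))
      = d.modify t [] (fun l => l ++ [i]) := by
  by_cases h : d.contains t = false
  · simp [h, PySem.Dict.modify, PySem.Dict.insert, PySem.Dict.getD_of_not_contains]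
  · simp [h]

theorem generate_target2indices_spec : Claim_equal_generate_target2indices := by
  intro targets _
  unfold Spec_generate_target2indices generate_target2indices generate_target2indices_alt
  have h1 : ((PySem.List.pyRange 0 (targets.length : Int) 1).foldl
      (fun (d : PySem.Dict Int (List Int)) (i : Int) =>
        let t := PySem.List.pyGetD targets i 0
        if d.contains t = false then d.insert t [i] else d.modify t [] (fun l => l ++ [i]))
      PySem.Dict.empty)
    = ((PySem.List.enumerate targets 0).map (fun p => (p.2, p.1))).foldl
        (fun (d : PySem.Dict Int (List Int)) p => d.modify p.1 [] (fun l => l ++ [p.2]))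
        PySem.Dict.empty := by
    rw [PySem.List.enumerate_eq_map_pyRange (d := 0)]
    simp only [List.map_map, List.foldl_map, Function.comp, PySem.List.len, pv_step_eq]
  rw [h1]
  set l := (PySem.List.enumerate targets 0).map (fun p => (p.2, p.1)) with hl
  have hnd : (l.foldl (fun (d : PySem.Dict Int (List Int)) p => d.modify p.1 [] (fun v => v ++ [p.2])) PySem.Dict.empty).keys.Nodup := by
    exact PySem.Dict.nodup_keys_foldl_modify_key l Prod.fst [] (fun d p => fun v => v ++ [p.2]) PySem.Dict.empty (by simp)
  have hkeys : (l.foldl (fun (d : PySem.Dict Int (List Int)) p => d.modify p.1 [] (fun v => v ++ [p.2])) PySem.Dict.empty).keys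
      = PySem.List.dedup targets := by
    rw [PySem.Dict.keys_foldl_modify_key l Prod.fst [] (fun d p => fun v => v ++ [p.2]) PySem.Dict.empty]
    simp [hl, List.map_map, Function.comp_def, PySem.List.map_snd_enumerate, PySem.Set.update, PySem.Set.ofList_eq_foldl]
  rw [PySem.Dict.items_eq_map_keys _ hnd [], hkeys]
  apply List.map_congr_left
  intro t ht
  rw [PySem.Dict.getD_foldl_modify_append]
  simp [hl, List.filter_map, List.map_map, Function.comp_def]
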